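-- pv_equiv track=rewrite | github.com/FHuang21/6.009_Labs | lab05.py | assign_room_limit
-- ===== SOURCE A (Python) =====
-- def combinations(a_list, length):
--     '''
--     return list of lists containing all combinations of length n of elements in a list
--     '''
--     combo_list = []
--     #base case
--     if length == 0:
--         return [[]]
--
--     for i in range(len(a_list)):
--         current = a_list[i]
--         remaining_list = a_list[i+1:]
--         #recursive function
--         for pos in combinations(remaining_list, length - 1):
--             combo_list.append([current] + pos)
--     return combo_list
--
-- def assign_room_limit(student_preferences,room_capacities):
--     formula = []
--     students = []
--     #for each student in all students
--     for student in student_preferences: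
--         students.append(student)
--     #for each room in all rooms
--     for room in room_capacities:
--         students_preferred = []
--         #for each student
--         for i in students:
--             #if student has room in their preferences, add to preferred students list
--             if room in student_preferences[i]:
--                 students_preferred.append(i)
--         #check if room capacity is less than students who prefer said room
--         if room_capacities[room] < len(students_preferred):
--             combo_list = []
--             for student in students:
--                 combo_list.append((student + '_' + room, False))
--             new_combo_list = combinations(combo_list, room_capacities[room]+1)
--             formula.extend(new_combo_list)
--     return formula
-- ===== SOURCE B (Python) =====
-- def assign_room_limit(student_preferences, room_capacities):
--     def pick(pool, r):
--         # all r-element sublists of pool, in the same (lexicographic) order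
--         if r == 0:
--             return [[]]
--         if r < 0 or not pool:
--             return []
--         head, rest = pool[0], pool[1:]
--         return [[head] + c for c in pick(rest, r - 1)] + pick(rest, r)
--
--     formula = []
--     for room, capacity in room_capacities.items():
--         demand = sum(room in prefs for prefs in student_preferences.values())
--         if capacity < demand:
--             variables = [(name + '_' + room, False) for name in student_preferences]
--             formula += pick(variables, capacity + 1)
--     return formula
-- ===== Notes on version B (the rewrite author's own statement) =====
-- stated objective: alternative
-- what changed: The index-loop-plus-slice recursive combinations helper is replaced by a head/tail structural recursion (with x / without x) producing the same lexicographic order, and the per-room preferred-students list is replaced by a direct count (sum of membership tests), since A only uses its length.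
import Mathlib
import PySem

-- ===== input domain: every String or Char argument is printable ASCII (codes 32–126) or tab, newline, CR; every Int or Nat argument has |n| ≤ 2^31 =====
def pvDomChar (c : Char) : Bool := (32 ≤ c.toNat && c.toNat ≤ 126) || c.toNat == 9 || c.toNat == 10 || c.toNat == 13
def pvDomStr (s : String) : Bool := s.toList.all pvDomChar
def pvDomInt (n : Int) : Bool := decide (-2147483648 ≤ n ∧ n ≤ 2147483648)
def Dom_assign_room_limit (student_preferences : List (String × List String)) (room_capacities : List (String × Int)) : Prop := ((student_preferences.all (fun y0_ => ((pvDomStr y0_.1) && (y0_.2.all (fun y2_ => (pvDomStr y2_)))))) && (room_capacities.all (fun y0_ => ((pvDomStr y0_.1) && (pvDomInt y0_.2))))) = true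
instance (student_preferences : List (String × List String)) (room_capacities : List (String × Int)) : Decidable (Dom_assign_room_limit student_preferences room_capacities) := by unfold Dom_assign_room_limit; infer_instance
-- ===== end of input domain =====

-- B replaces A's index-loop-plus-slice recursive combinations generator by a head/tail structural
-- recursion in the same lexicographic order, and counts preferring students instead of listing them
-- (A only uses the list's length): objective 'alternative'.

-- ===== PORT A =====
-- port of the module helper 'combinations', at the element type A uses it with
def pyCombinations (a_list : List (String × Bool)) (length : Int) : List (List (String × Bool)) :=
  if length = 0 then [[]]
  else
    (List.range a_list.length).attach.foldl
      (fun combo_list i =>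
        combo_list ++
          (pyCombinations (PySem.List.slice a_list (some ((i.1 + 1 : Nat) : Int)) none) (length - 1)).map
            (fun pos => (PySem.List.pyGetD a_list (i.1 : Int) ("", false)) :: pos))
      []
termination_by a_list.length
decreasing_by
  have hi : i.1 < a_list.length := List.mem_range.mp i.2
  simp only [PySem.List.slice_from_natCast, List.length_drop]
  omega

def assign_room_limit (student_preferences : List (String × List String)) (room_capacities : List (String × Int)) : List (List (String × Bool)) :=
  let spd := PySem.Dict.ofList student_preferences
  let rcd := PySem.Dict.ofList room_capacities
  let students := spd.keys.foldl (fun students student => students ++ [student]) []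
  rcd.keys.foldl (fun formula room =>
    let students_preferred :=
      students.foldl (fun acc i => if (spd.getD i []).contains room then acc ++ [i] else acc) []
    if rcd.getD room 0 < (students_preferred.length : Int) then
      let combo_list := students.foldl (fun acc student => acc ++ [(student ++ "_" ++ room, false)]) []
      formula ++ pyCombinations combo_list (rcd.getD room 0 + 1)
    else formula) []

-- ===== PORT B =====
-- port of Source B's helper 'pick': head/tail structural recursion
def pick (pool : List (String × Bool)) (r : Int) : List (List (String × Bool)) :=
  if r = 0 then [[]]
  else if r < 0 then []
  else
    match pool with
    | [] => []
    | head :: rest => ((pick rest (r - 1)).map (fun c => head :: c)) ++ pick rest r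
termination_by pool.length

def assign_room_limit_alt (student_preferences : List (String × List String)) (room_capacities : List (String × Int)) : List (List (String × Bool)) :=
  let spd := PySem.Dict.ofList student_preferences
  let rcd := PySem.Dict.ofList room_capacities
  rcd.items.foldl (fun formula p =>
    let demand := (spd.values.map (fun prefs => if prefs.contains p.1 then (1 : Int) else 0)).sum
    if p.2 < demand then
      formula ++ pick (spd.keys.map (fun name => (name ++ "_" ++ p.1, false))) (p.2 + 1)
    else formula) []

-- ===== PRECONDITION & SPEC =====
def Spec_assign_room_limit (student_preferences : List (String × List String)) (room_capacities : List (String × Int)) (out : List (List (String × Bool))) : Prop := out = assign_room_limit_alt student_preferences room_capacities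
instance (student_preferences : List (String × List String)) (room_capacities : List (String × Int)) (out : List (List (String × Bool))) : Decidable (Spec_assign_room_limit student_preferences room_capacities out) := by unfold Spec_assign_room_limit; infer_instance

-- ===== CLAIM (what is proved, stated in full; the proofs are below) =====
def Claim_equal_assign_room_limit : Prop := ∀ (student_preferences : List (String × List String)) (room_capacities : List (String × Int)), Dom_assign_room_limit student_preferences room_capacities → Spec_assign_room_limit student_preferences room_capacities (assign_room_limit student_preferences room_capacities)

-- ===== LEMMAS AND PROOFS =====

-- unrolled characterisation of A's helper for length ≠ 0
theorem pyCombinations_eq_flatMap (a_list : List (String × Bool)) (len : Int) (h : len ≠ 0) :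
    pyCombinations a_list len =
      (List.range a_list.length).flatMap (fun i =>
        (pyCombinations (a_list.drop (i + 1)) (len - 1)).map
          (fun pos => (a_list.getD i ("", false)) :: pos)) := by
  rw [pyCombinations.eq_def, if_neg h]
  rw [PySem.List.foldl_append_eq_flatMap]
  simp only [List.nil_append]
  simp
  congr 1
  funext i
  rw [show ((i : Nat) : Int) + 1 = (((i + 1 : Nat)) : Int) from by push_cast; ring]
  rw [PySem.List.slice_from_natCast]

theorem pyCombinations_neg : ∀ (n : Nat) (a_list : List (String × Bool)), a_list.length ≤ n →
    ∀ len : Int, len < 0 → pyCombinations a_list len = [] := by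
  intro n
  induction n with
  | zero =>
    intro l hl len hlen
    have : l = [] := List.eq_nil_of_length_eq_zero (Nat.le_zero.mp hl)
    subst this
    rw [pyCombinations_eq_flatMap _ _ (by omega)]
    simp
  | succ n ih =>
    intro l hl len hlen
    rw [pyCombinations_eq_flatMap _ _ (by omega)]
    apply List.flatMap_eq_nil_iff.mpr
    intro i hi
    rw [ih (l.drop (i + 1)) (by simp; omega) (len - 1) (by omega)]
    simp

theorem pyCombinations_eq_pick : ∀ (n : Nat) (l : List (String × Bool)), l.length ≤ n →
    ∀ r : Int, pyCombinations l r = pick l r := by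
  intro n
  induction n with
  | zero =>
    intro l hl r
    have : l = [] := List.eq_nil_of_length_eq_zero (Nat.le_zero.mp hl)
    subst this
    by_cases h0 : r = 0
    · subst h0; rw [pyCombinations.eq_def, pick.eq_def]; simp
    · rw [pyCombinations_eq_flatMap _ _ h0, pick]
      simp [h0]
  | succ n ih =>
    intro l hl r
    by_cases h0 : r = 0
    · subst h0; rw [pyCombinations.eq_def, pick.eq_def]; simp
    by_cases hneg : r < 0
    · rw [pyCombinations_neg (n + 1) l hl r hneg, pick.eq_def, if_neg h0, if_pos hneg]
    cases l with
    | nil =>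
      rw [pyCombinations_eq_flatMap _ _ h0, pick.eq_def]
      simp [h0, hneg]
    | cons x xs =>
      rw [pyCombinations_eq_flatMap _ _ h0]
      have hxs : xs.length ≤ n := by simpa using hl
      rw [show (x :: xs).length = xs.length + 1 from rfl, List.range_succ_eq_map,
        List.flatMap_cons, List.flatMap_map]
      have h1 : (List.range xs.length).flatMap
          (fun i => (pyCombinations ((x :: xs).drop (Nat.succ i + 1)) (r - 1)).map
            (fun pos => ((x :: xs).getD (Nat.succ i) ("", false)) :: pos))
          = pyCombinations xs r := by
        rw [pyCombinations_eq_flatMap _ _ h0]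
        apply List.flatMap_congr
        intro i _
        rfl
      rw [h1]
      simp only [List.drop_succ_cons, List.drop_zero, List.getD_cons_zero]
      rw [ih xs hxs (r - 1), ih xs hxs r]
      conv_rhs => rw [pick.eq_def]
      rw [if_neg h0, if_neg hneg]

-- per-room equality of the two loop bodies, then the folds agree
theorem assign_room_limit_eq_alt (student_preferences : List (String × List String)) (room_capacities : List (String × Int)) :
    assign_room_limit student_preferences room_capacities = assign_room_limit_alt student_preferences room_capacities := by
  unfold assign_room_limit assign_room_limit_alt
  dsimp only
  set spd := PySem.Dict.ofList student_preferences with hspd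
  set rcd := PySem.Dict.ofList room_capacities with hrcd
  rw [PySem.Dict.items_eq_map_keys rcd (PySem.Dict.nodup_keys_ofList _) 0, List.foldl_map]
  congr 1
  funext formula room
  have hstudents : spd.keys.foldl (fun students student => students ++ [student]) [] = spd.keys := by
    simpa using PySem.List.foldl_append_singleton_eq_map id spd.keys []
  rw [hstudents]
  have hpref : spd.keys.foldl (fun acc i => if (spd.getD i []).contains room then acc ++ [i] else acc) []
      = spd.keys.filter (fun i => (spd.getD i []).contains room) := by
    simpa using PySem.List.foldl_append_if (fun i => (spd.getD i []).contains room) id spd.keys []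
  rw [hpref]
  have hdemand : (spd.values.map (fun prefs => if prefs.contains room then (1 : Int) else 0)).sum
      = ((spd.keys.filter (fun i => (spd.getD i []).contains room)).length : Int) := by
    rw [PySem.Dict.values_eq_map_keys spd (PySem.Dict.nodup_keys_ofList _) []]
    rw [List.map_map]
    simp only [Function.comp_def]
    rw [PySem.List.sum_map_ite_one_zero]
    rw [List.countP_eq_length_filter]
  rw [hdemand]
  by_cases hc : rcd.getD room 0 < ((spd.keys.filter (fun i => (spd.getD i []).contains room)).length : Int)
  · rw [if_pos hc, if_pos hc]
    have hcombo : spd.keys.foldl (fun acc student => acc ++ [(student ++ "_" ++ room, false)]) []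
        = spd.keys.map (fun name => (name ++ "_" ++ room, false)) := by
      simpa using PySem.List.foldl_append_singleton_eq_map (fun name => (name ++ "_" ++ room, false)) spd.keys []
    rw [hcombo, pyCombinations_eq_pick (spd.keys.map (fun name => (name ++ "_" ++ room, false))).length _ le_rfl]
  · rw [if_neg hc, if_neg hc]

-- ===== VERDICT (by name: the statement is the Claim_ definition above) =====
theorem assign_room_limit_spec : Claim_equal_assign_room_limit := by
  intro student_preferences room_capacities _
  exact assign_room_limit_eq_alt student_preferences room_capacities
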